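-- pv_equiv track=rewrite | github.com/jjunhyub/vercel_hsamhsam | nextjs/build_review_analysis.py | xlsx_columns
-- ===== SOURCE A (Python) =====
-- from typing import Any
--
-- def xlsx_columns(rows: list[dict[str, Any]], preferred: list[str] | None = None) -> list[str]:
--     columns: list[str] = []
--     if preferred:
--         columns.extend([column for column in preferred if column not in columns])
--     for row in rows:
--         for column in row:
--             if column != "table_name" and column not in columns:
--                 columns.append(column)
--     return columns
-- ===== SOURCE B (Python) =====
-- def xlsx_columns(rows, preferred=None):
--     head = list(preferred) if preferred else []
--     drop = set(head)
--     drop.add("table_name")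
--     xs = [k for row in rows for k in row if k not in drop]
--     # first-occurrence dedup by repeated filtering: emit the current head,
--     # delete all of its later occurrences, continue with what remains
--     out = []
--     while xs:
--         h = xs[0]
--         out.append(h)
--         xs = [x for x in xs[1:] if x != h]
--     return head + out
-- ===== Notes on version B (the rewrite author's own statement) =====
-- stated objective: alternative
-- what changed: B keeps preferred verbatim as a head, filters blocked keys out of the flattened row keys in one pass, then dedups by a repeated-filtering loop (emit the current head, delete all its later occurrences from the remainder) instead of A's accumulator with a membership test against the growing output list.
import Mathlib
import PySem

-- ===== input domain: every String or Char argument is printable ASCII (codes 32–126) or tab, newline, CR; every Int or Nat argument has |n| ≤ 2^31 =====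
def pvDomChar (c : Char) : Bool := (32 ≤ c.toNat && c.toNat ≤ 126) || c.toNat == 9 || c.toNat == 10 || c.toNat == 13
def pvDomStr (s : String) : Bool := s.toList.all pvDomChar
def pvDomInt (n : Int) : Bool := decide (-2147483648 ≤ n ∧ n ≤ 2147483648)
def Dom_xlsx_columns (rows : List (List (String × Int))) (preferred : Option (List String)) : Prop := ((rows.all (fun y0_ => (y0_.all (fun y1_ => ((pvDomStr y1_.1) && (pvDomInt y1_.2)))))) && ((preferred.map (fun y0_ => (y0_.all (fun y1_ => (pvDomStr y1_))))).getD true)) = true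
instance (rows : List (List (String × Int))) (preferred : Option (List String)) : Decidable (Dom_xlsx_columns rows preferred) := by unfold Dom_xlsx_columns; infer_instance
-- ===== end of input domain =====

-- B keeps preferred verbatim as a head, filters blocked keys out of the flattened row keys,
-- then dedups by a repeated-filtering loop (emit the head, delete its later occurrences)
-- instead of A's accumulator with a membership test against the growing output list.

-- ===== PORT A =====
def xlsx_columns (rows : List (List (String × Int))) (preferred : Option (List String)) : List String :=
  -- columns = []; if preferred: columns.extend([c for c in preferred if c not in columns])
  -- (the comprehension is evaluated before the extend, so membership is tested against [])
  let columns : List String := []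
  let columns : List String :=
    match preferred with
    | some p => if p ≠ [] then columns ++ p.filter (fun c => c ∉ columns) else columns
    | none => columns
  -- for row in rows: for column in row: if column != "table_name" and column not in columns: append
  rows.foldl (fun columns row =>
    (row.map Prod.fst).foldl (fun columns column =>
      if column ≠ "table_name" ∧ column ∉ columns then columns ++ [column] else columns)
      columns) columns

-- ===== PORT B =====
-- the while loop: emit xs[0], delete its later occurrences, continue with the rest
def uniqLoop (out : List String) (xs : List String) : List String :=
  match xs with
  | [] => out
  | h :: t => uniqLoop (out ++ [h]) (t.filter (fun x => x ≠ h))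
  termination_by xs.length
  decreasing_by
    simp only [List.length_unattach, List.length_cons, Nat.lt_succ_iff]
    exact le_trans (List.length_filter_le _ _) (by simp)

def xlsx_columns_alt (rows : List (List (String × Int))) (preferred : Option (List String)) : List String :=
  -- head = list(preferred) if preferred else []
  let head : List String :=
    match preferred with
    | some p => if p ≠ [] then p else []
    | none => []
  -- drop = set(head); drop.add("table_name")
  let drop : PySem.Set String := PySem.Set.add (PySem.Set.ofList head) "table_name"
  -- xs = [k for row in rows for k in row if k not in drop]
  let xs : List String :=
    rows.flatMap (fun row => (row.map Prod.fst).filter (fun k => !(PySem.Set.contains drop k)))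
  -- out = []; while xs: out.append(xs[0]); xs = [x for x in xs[1:] if x != xs[0]]
  -- return head + out
  head ++ uniqLoop [] xs

-- ===== PRECONDITION & SPEC =====
def Spec_xlsx_columns (rows : List (List (String × Int))) (preferred : Option (List String)) (out : List String) : Prop := out = xlsx_columns_alt rows preferred
instance (rows : List (List (String × Int))) (preferred : Option (List String)) (out : List String) : Decidable (Spec_xlsx_columns rows preferred out) := by unfold Spec_xlsx_columns; infer_instance

-- ===== CLAIM (what is proved, stated in full; the proofs are below) =====
def Claim_equal_xlsx_columns : Prop := ∀ (rows : List (List (String × Int))) (preferred : Option (List String)), Dom_xlsx_columns rows preferred → Spec_xlsx_columns rows preferred (xlsx_columns rows preferred)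

-- ===== LEMMAS AND PROOFS =====

-- B's drop-set membership is "in head or equals table_name".
theorem drop_mem (head : List String) (k : String) :
    (PySem.Set.contains (PySem.Set.add (PySem.Set.ofList head) "table_name") k)
    = decide (k ∈ head ∨ k = "table_name") := by
  simp [PySem.Set.contains, PySem.Set.mem_add, PySem.Set.mem_ofList]

-- A's nested row loop is a single fold over the flattened keys.
theorem foldA_flat (rows : List (List (String × Int))) (cols : List String) :
    rows.foldl (fun columns row =>
      (row.map Prod.fst).foldl (fun columns column =>
        if column ≠ "table_name" ∧ column ∉ columns then columns ++ [column] else columns)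
      columns) cols
    = (rows.flatMap (fun row => row.map Prod.fst)).foldl (fun columns column =>
        if column ≠ "table_name" ∧ column ∉ columns then columns ++ [column] else columns) cols := by
  induction rows generalizing cols with
  | nil => rfl
  | cons r rs ih => simp only [List.foldl_cons, List.flatMap_cons, List.foldl_append, ih]

-- A's append-if-unseen-and-unblocked fold starting from head equals
-- head ++ the append-if-unseen fold of the unblocked keys.
theorem foldA_split (head : List String) (l : List String) : ∀ acc : List String,
    (∀ a ∈ acc, a ∉ head ∧ a ≠ "table_name") →
    l.foldl (fun columns column =>
      if column ≠ "table_name" ∧ column ∉ columns then columns ++ [column] else columns)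
      (head ++ acc)
    = head ++ (l.filter (fun k => decide (k ∉ head ∧ k ≠ "table_name"))).foldl
        (fun s c => if c ∈ s then s else s ++ [c]) acc := by
  induction l with
  | nil => intro acc _; rfl
  | cons k t ih =>
    intro acc hacc
    simp only [List.foldl_cons, List.filter_cons]
    by_cases hP : k ∉ head ∧ k ≠ "table_name"
    · have hd : decide (k ∉ head ∧ k ≠ "table_name") = true := by simp [hP.1, hP.2]
      by_cases hm : k ∈ acc
      · rw [if_neg (fun hc => hc.2 (List.mem_append_right _ hm)), hd, if_pos rfl]
        simp only [List.foldl_cons]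
        rw [if_pos hm]
        exact ih acc hacc
      · rw [if_pos ⟨hP.2, by simp [hP.1, hm]⟩, hd, if_pos rfl]
        simp only [List.foldl_cons]
        rw [if_neg hm, List.append_assoc]
        exact ih (acc ++ [k]) (by
          intro a ha; rcases List.mem_append.1 ha with h | h
          · exact hacc a h
          · simp only [List.mem_singleton] at h; subst h; exact hP)
    · have hd : decide (k ∉ head ∧ k ≠ "table_name") = false := decide_eq_false hP
      have hin : k ∈ head ∨ k = "table_name" := by tauto
      have hstep : ¬ (k ≠ "table_name" ∧ k ∉ head ++ acc) := by
        rcases hin with h | h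
        · rintro ⟨-, h2⟩; exact h2 (by simp [h])
        · rintro ⟨h1, -⟩; exact h1 h
      rw [if_neg hstep, hd, if_neg (by simp)]
      exact ih acc hacc

-- uniqLoop computes the same first-occurrence dedup as the append-if-unseen fold.
theorem uniqLoop_eq_foldl (n : Nat) : ∀ l : List String, l.length ≤ n → ∀ acc : List String,
    l.foldl (fun s c => if c ∈ s then s else s ++ [c]) acc
    = uniqLoop acc (l.filter (fun x => decide (x ∉ acc))) := by
  induction n with
  | zero =>
    intro l hl acc
    have : l = [] := List.eq_nil_of_length_eq_zero (Nat.le_zero.1 hl)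
    subst this; simp [uniqLoop]
  | succ n ih =>
    intro l hl acc
    cases l with
    | nil => simp [uniqLoop]
    | cons c t =>
      simp only [List.foldl_cons, List.filter_cons]
      by_cases hm : c ∈ acc
      · rw [if_pos hm, if_neg (by simp [hm])]
        exact ih t (Nat.le_of_succ_le_succ hl) acc
      · rw [if_neg hm, if_pos (by simp [hm])]
        rw [ih t (Nat.le_of_succ_le_succ hl) (acc ++ [c])]
        rw [show uniqLoop acc (c :: t.filter (fun x => decide (x ∉ acc)))
            = uniqLoop (acc ++ [c]) ((t.filter (fun x => decide (x ∉ acc))).filter (fun x => x ≠ c)) from by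
          simp [uniqLoop]]
        congr 1
        rw [List.filter_filter]
        apply List.filter_congr
        intro x _
        by_cases h1 : x ∈ acc <;> by_cases h2 : x = c <;> simp [h1, h2]

-- ===== VERDICT (by name: the statement is the Claim_ definition above) =====
theorem xlsx_columns_spec : Claim_equal_xlsx_columns := by
  intro rows preferred _
  show xlsx_columns rows preferred = xlsx_columns_alt rows preferred
  unfold xlsx_columns xlsx_columns_alt
  simp only [foldA_flat]
  have key : ∀ head : List String,
      (rows.flatMap (fun row => row.map Prod.fst)).foldl (fun columns column =>
        if column ≠ "table_name" ∧ column ∉ columns then columns ++ [column] else columns) head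
      = head ++ uniqLoop [] (rows.flatMap (fun row =>
          (row.map Prod.fst).filter (fun k =>
            !(PySem.Set.contains (PySem.Set.add (PySem.Set.ofList head) "table_name") k)))) := by
    intro head
    have h1 := foldA_split head (rows.flatMap (fun row => row.map Prod.fst)) [] (by simp)
    rw [List.append_nil] at h1
    rw [h1]
    set l := (rows.flatMap (fun row => row.map Prod.fst)).filter
        (fun k => decide (k ∉ head ∧ k ≠ "table_name")) with hldef
    have h2 := uniqLoop_eq_foldl l.length l le_rfl []
    simp only [List.mem_nil_iff, not_false_iff, decide_true, List.filter_true] at h2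
    rw [h2]
    refine congrArg (fun x => head ++ uniqLoop [] x) ?_
    have hrow : ∀ row : List (String × Int),
        (row.map Prod.fst).filter (fun k =>
          !(PySem.Set.contains (PySem.Set.add (PySem.Set.ofList head) "table_name") k))
        = (row.map Prod.fst).filter (fun k => decide (k ∉ head ∧ k ≠ "table_name")) := by
      intro row
      apply List.filter_congr
      intro k _
      rw [drop_mem]
      by_cases h1 : k ∈ head <;> by_cases h2 : k = "table_name" <;> simp [h1, h2]
    rw [hldef, List.filter_flatMap]
    simp only [hrow]
  cases preferred with
  | none => simpa using key []
  | some p =>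
    by_cases hpe : p = []
    · subst hpe; simpa using key []
    · simp only [if_pos hpe]
      have hp : p.filter (fun c => decide (c ∉ ([] : List String))) = p := by simp
      simpa [hp] using key p
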